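-- pv_equiv track=rewrite | github.com/rodrigorahal/advent-of-code-2023 | 14/parabolic.py | tilt_east
-- ===== SOURCE A (Python) =====
-- def tilt_east(grid):
--     H = len(grid)
--     W = len(grid[0])
--
--     for col in range(W - 2, -1, -1):
--         for row in range(H):
--             rock = grid[row][col]
--             if rock in ".#":
--                 continue
--
--             curr = col
--             c = col + 1
--             for c in range(col + 1, W):
--                 if grid[row][c] != ".":
--                     break
--                 curr = c
--
--             if curr != col:
--                 grid[row][curr] = rock
--                 grid[row][col] = "."
--     return grid
-- ===== SOURCE B (Python) =====
-- def tilt_east(grid):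
--     # Single right-to-left pass per row tracking the next free slot (mutates grid in place, like A).
--     W = len(grid[0])
--     for row in grid:
--         free = None
--         for col in range(W - 1, -1, -1):
--             cell = row[col]
--             if cell == ".":
--                 if free is None:
--                     free = col
--             elif cell in ".#":
--                 free = None
--             else:
--                 if free is not None:
--                     row[free] = cell
--                     row[col] = "."
--                     free -= 1
--     return grid
-- ===== Notes on version B (the rewrite author's own statement) =====
-- stated objective: faster
-- what changed: Replaced A's per-rock eastward rescan (for every rock, walk right until blocked) by a single right-to-left pass per row that tracks the next free slot, resetting it at blockers.
-- outside the precondition, e.g. on tilt_east([['.', '.'], ['.']]): A returns [['.', '.'], ['.']], B raises IndexError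
import Mathlib
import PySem

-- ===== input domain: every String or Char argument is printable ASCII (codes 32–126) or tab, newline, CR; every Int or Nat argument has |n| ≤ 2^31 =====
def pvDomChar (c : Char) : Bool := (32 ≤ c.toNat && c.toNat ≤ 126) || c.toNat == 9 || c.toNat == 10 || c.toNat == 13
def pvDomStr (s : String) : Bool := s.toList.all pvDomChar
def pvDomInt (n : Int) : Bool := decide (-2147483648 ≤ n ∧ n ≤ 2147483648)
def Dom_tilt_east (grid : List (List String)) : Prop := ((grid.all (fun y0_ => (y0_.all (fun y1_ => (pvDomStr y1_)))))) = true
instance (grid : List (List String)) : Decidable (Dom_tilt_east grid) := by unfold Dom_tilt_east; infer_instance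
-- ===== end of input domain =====

-- B replaces A's per-rock eastward rescan by one right-to-left pass per row tracking the next
-- free slot (objective: faster). Both Pythons mutate the grid in place and return it; the
-- equivalence proved here is about the returned value (both perform the same mutation).

-- ===== PORT A =====
-- A's inner 'for c in range(col + 1, W): …' scan; state (curr, broken)
def tiltScan (r : List String) (W col : Int) : Int :=
  ((PySem.List.pyRange (col + 1) W 1).foldl
    (fun st c =>
      if st.2 then st
      else if PySem.List.pyGetD r c "" ≠ "." then (st.1, true)
      else (c, false))
    (col, false)).1

-- the body of A's 'for row' loop, acting on the one row it reads and writes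
def astepRow (W col : Int) (r : List String) : List String :=
  let rock := PySem.List.pyGetD r col ""
  if PySem.Str.isIn rock ".#" then r
  else
    let curr := tiltScan r W col
    if curr ≠ col then
      PySem.List.pySetD (PySem.List.pySetD r curr rock) col "."
    else r

-- A's 'for row in range(H)' loop
def innerFold (W H col : Int) (g : List (List String)) : List (List String) :=
  (PySem.List.pyRange 0 H 1).foldl
    (fun g row => PySem.List.pySetD g row (astepRow W col (PySem.List.pyGetD g row []))) g

def tilt_east (grid : List (List String)) : List (List String) :=
  let H : Int := grid.length
  let W : Int := (PySem.List.pyGetD grid 0 []).length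
  (PySem.List.pyRange (W - 2) (-1) (-1)).foldl (fun g col => innerFold W H col g) grid

-- ===== PORT B =====
-- body of B's 'for col in range(W - 1, -1, -1)' loop; state (row, free)
def bstep (st : List String × Option Int) (col : Int) : List String × Option Int :=
  let r := st.1
  let free := st.2
  let cell := PySem.List.pyGetD r col ""
  if cell = "." then (r, if free = none then some col else free)
  else if PySem.Str.isIn cell ".#" then (r, none)
  else
    match free with
    | some f => (PySem.List.pySetD (PySem.List.pySetD r f cell) col ".", some (f - 1))
    | none => (r, none)

-- B's per-row right-to-left pass
def tiltRowB (W : Int) (r : List String) : List String :=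
  ((PySem.List.pyRange (W - 1) (-1) (-1)).foldl bstep (r, none)).1

def tilt_east_alt (grid : List (List String)) : List (List String) :=
  let W : Int := (PySem.List.pyGetD grid 0 []).length
  grid.map (tiltRowB W)

-- ===== PRECONDITION & SPEC =====
-- Pre_ excludes the empty grid (A raises IndexError on grid[0]) and grids with some row shorter
-- than the first row, on which indexing row[col] for col < len(grid[0]) can raise IndexError in
-- A (and likewise in B); on the few such grids where A happens not to index out of range
-- (e.g. W ≤ 1, or no rock reaches the short row) B raises, so these stay excluded.
def Pre_tilt_east (grid : List (List String)) : Prop :=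
  grid ≠ [] ∧ ∀ r ∈ grid, (grid.getD 0 []).length ≤ r.length
instance (grid : List (List String)) : Decidable (Pre_tilt_east grid) := by
  unfold Pre_tilt_east; infer_instance

def pvWitness_tilt_east : List (List String) :=
  [["O", ".", "#", "O", "."], [".", ".", "O", ".", "."]]

def Spec_tilt_east (grid : List (List String)) (out : List (List String)) : Prop := out = tilt_east_alt grid
instance (grid : List (List String)) (out : List (List String)) : Decidable (Spec_tilt_east grid out) := by unfold Spec_tilt_east; infer_instance

-- ===== CLAIM (what is proved, stated in full; the proofs are below) =====
def Claim_equal_tilt_east : Prop := ∀ (grid : List (List String)), Dom_tilt_east grid → Pre_tilt_east grid → Spec_tilt_east grid (tilt_east grid)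

-- ===== LEMMAS AND PROOFS =====

-- B's loop invariant: after the columns > j of the row have been processed, free = some f iff
-- cells j+1..f are "." and cell f+1 (if inside the grid) blocks; free = none iff cell j+1 blocks.
def RowInv (n : Nat) (j : Int) (r : List String) (free : Option Int) : Prop :=
  match free with
  | none => (n : Int) ≤ j + 1 ∨ PySem.List.pyGetD r (j + 1) "" ≠ "."
  | some f => j + 1 ≤ f ∧ f < (n : Int) ∧
      (∀ c : Int, j + 1 ≤ c → c ≤ f → PySem.List.pyGetD r c "" = ".") ∧
      (f + 1 < (n : Int) → PySem.List.pyGetD r (f + 1) "" ≠ ".")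

theorem getD_setD (r : List String) (i m : Int) (v d : String)
    (h0 : 0 ≤ i) (h1 : i < r.length) (hm0 : 0 ≤ m) (hm1 : m < r.length) :
    PySem.List.pyGetD (PySem.List.pySetD r i v) m d = if m = i then v else PySem.List.pyGetD r m d := by
  rw [PySem.List.pySetD_of_nonneg r v h0,
      PySem.List.pyGetD_eq_getElem _ _ hm0 (by simpa using hm1),
      PySem.List.pyGetD_eq_getElem r d hm0 hm1, List.getElem_set]
  split_ifs with h2 h3 h3 <;> first | rfl | omega

theorem scan_stopped (r : List String) (l : List Int) (st : Int × Bool) (h : st.2 = true) :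
    l.foldl (fun st c =>
      if st.2 then st
      else if PySem.List.pyGetD r c "" ≠ "." then (st.1, true)
      else (c, false)) st = st := by
  induction l with
  | nil => rfl
  | cons c l ih => simp only [List.foldl_cons, h, if_pos]; exact ih

theorem scan_dots (r : List String) : ∀ (k : Nat) (a b x : Int), b - a = (k : Int) →
    (∀ c : Int, a ≤ c → c < b → PySem.List.pyGetD r c "" = ".") →
    (PySem.List.pyRange a b 1).foldl (fun st c =>
      if st.2 then st
      else if PySem.List.pyGetD r c "" ≠ "." then (st.1, true)
      else (c, false)) (x, false) = (if a < b then b - 1 else x, false) := by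
  intro k
  induction k with
  | zero =>
    intro a b x hk hdots
    push_cast at hk
    rw [PySem.List.pyRange_one_eq_nil (by omega), List.foldl_nil, if_neg (by omega)]
  | succ k ih =>
    intro a b x hk hdots
    push_cast at hk
    rw [PySem.List.pyRange_one_cons (by omega), List.foldl_cons]
    have ha : PySem.List.pyGetD r a "" = "." := hdots a le_rfl (by omega)
    have hstep : (if (x, false).2 = true then (x, false)
        else if PySem.List.pyGetD r a "" ≠ "." then ((x, false).1, true)
        else (a, false)) = ((a : Int), false) := by simp [ha]
    rw [hstep, ih (a + 1) b a (by omega) (fun c hc1 hc2 => hdots c (by omega) hc2)]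
    by_cases hab : a + 1 < b
    · rw [if_pos hab, if_pos (by omega)]
    · rw [if_neg hab, if_pos (by omega)]; congr 1; omega

theorem scan_eval (n : Nat) (col : Int) (r : List String) (free : Option Int)
    (hInv : RowInv n col r free) :
    tiltScan r (n : Int) col = free.getD col := by
  unfold tiltScan
  cases free with
  | none =>
    rcases hInv with h | h
    · rw [PySem.List.pyRange_one_eq_nil (by omega), List.foldl_nil]; rfl
    · by_cases hW : (n : Int) ≤ col + 1
      · rw [PySem.List.pyRange_one_eq_nil (by omega), List.foldl_nil]; rfl
      · rw [PySem.List.pyRange_one_cons (by omega), List.foldl_cons]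
        have hstep : (if ((col : Int), false).2 = true then ((col : Int), false)
            else if PySem.List.pyGetD r (col + 1) "" ≠ "." then (((col : Int), false).1, true)
            else (col + 1, false)) = ((col : Int), true) := by simp [h]
        rw [hstep, scan_stopped r _ _ rfl]; rfl
  | some f =>
    obtain ⟨hf1, hf2, hdots, hblock⟩ := hInv
    rw [PySem.List.pyRange_one_append (col + 1) (f + 1) (n : Int) (by omega) (by omega),
        List.foldl_append]
    rw [scan_dots r (f - col).toNat (col + 1) (f + 1) col (by omega)
        (fun c hc1 hc2 => hdots c hc1 (by omega)), if_pos (by omega)]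
    by_cases hW : (n : Int) ≤ f + 1
    · rw [PySem.List.pyRange_one_eq_nil (by omega), List.foldl_nil]
      simp
    · rw [PySem.List.pyRange_one_cons (by omega), List.foldl_cons]
      have hstep : (if ((f + 1 - 1 : Int), false).2 = true then ((f + 1 - 1 : Int), false)
          else if PySem.List.pyGetD r (f + 1) "" ≠ "." then (((f + 1 - 1 : Int), false).1, true)
          else (f + 1, false)) = ((f + 1 - 1 : Int), true) := by
        simp [hblock (by omega)]
      rw [hstep, scan_stopped r _ _ rfl]
      simp

theorem stepBoth (n : Nat) (col : Int) (r : List String) (free : Option Int)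
    (h0 : 0 ≤ col) (h1 : col < (n : Int)) (hr : n ≤ r.length) (hInv : RowInv n col r free) :
    astepRow (n : Int) col r = (bstep (r, free) col).1 ∧
    RowInv n (col - 1) (bstep (r, free) col).1 (bstep (r, free) col).2 ∧
    (bstep (r, free) col).1.length = r.length := by
  have hc1 : col - 1 + 1 = col := by omega
  by_cases hdot : PySem.List.pyGetD r col "" = "."
  · have hin : PySem.Str.isIn (PySem.List.pyGetD r col "") ".#" = true := by rw [hdot]; decide
    simp only [astepRow, bstep, hdot, if_pos]
    refine ⟨by trivial, ?_, by trivial⟩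
    cases free with
    | none =>
      simp only [RowInv] at hInv ⊢
      refine ⟨by omega, by omega, ?_, ?_⟩
      · intro c hcl hcr
        have : c = col := by omega
        rw [this, hdot]
      · intro h; rw [hc1] at *; rcases hInv with h' | h' <;> [omega; exact h']
    | some f =>
      obtain ⟨hf1, hf2, hdots, hblock⟩ := hInv
      simp only [RowInv]
      refine ⟨by omega, hf2, ?_, hblock⟩
      intro c hcl hcr
      by_cases hcc : c = col
      · rw [hcc, hdot]
      · exact hdots c (by omega) hcr
  · by_cases hin : PySem.Str.isIn (PySem.List.pyGetD r col "") ".#" = true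
    · simp only [astepRow, bstep, hin, if_pos, if_neg hdot]
      refine ⟨by trivial, ?_, by trivial⟩
      simp only [RowInv]
      right; rw [hc1]; exact hdot
    · have hscan : tiltScan r (n : Int) col = free.getD col := scan_eval n col r free hInv
      cases free with
      | none =>
        simp only [astepRow, bstep, hin, if_neg hdot, Bool.false_eq_true, if_false, hscan,
          Option.getD_none, ne_eq, not_true_eq_false]
        refine ⟨by trivial, ?_, by trivial⟩
        simp only [RowInv]
        right; rw [hc1]; exact hdot
      | some f =>
        obtain ⟨hf1, hf2, hdots, hblock⟩ := hInv
        have hfcol : (f : Int) ≠ col := by omega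
        simp only [astepRow, bstep, hin, if_neg hdot, Bool.false_eq_true, if_false, hscan,
          Option.getD_some, ne_eq, hfcol, not_false_eq_true, if_pos]
        have hlen1 : (PySem.List.pySetD r f (PySem.List.pyGetD r col "")).length = r.length :=
          PySem.List.length_pySetD r f _
        refine ⟨by trivial, ?_, by simp [PySem.List.length_pySetD, hlen1]⟩
        simp only [RowInv]
        have hget : ∀ m : Int, 0 ≤ m → m < (n : Int) →
            PySem.List.pyGetD (PySem.List.pySetD (PySem.List.pySetD r f
              (PySem.List.pyGetD r col "")) col ".") m "" =
            if m = col then "." else if m = f then PySem.List.pyGetD r col "" else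
              PySem.List.pyGetD r m "" := by
          intro m hm0 hm1
          rw [getD_setD _ col m _ _ h0 (by omega) hm0 (by omega)]
          by_cases he : m = col
          · rw [if_pos he, if_pos he]
          · rw [if_neg he, if_neg he, getD_setD r f m _ _ (by omega) (by omega) hm0 (by omega)]
        refine ⟨by omega, by omega, ?_, ?_⟩
        · intro c hcl hcr
          rw [hget c (by omega) (by omega)]
          split_ifs with e1 e2
          · rfl
          · omega
          · exact hdots c (by omega) (by omega)
        · intro hfW
          have : f - 1 + 1 = f := by omega
          rw [this, hget f (by omega) (by omega), if_neg hfcol, if_pos rfl]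
          exact hdot

theorem rowLoop (n : Nat) : ∀ (k : Nat) (j : Int) (r : List String) (free : Option Int),
    j = (k : Int) - 1 → j < (n : Int) → n ≤ r.length → RowInv n j r free →
    (PySem.List.pyRange j (-1) (-1)).foldl (fun r col => astepRow (n : Int) col r) r
      = ((PySem.List.pyRange j (-1) (-1)).foldl bstep (r, free)).1 := by
  intro k
  induction k with
  | zero =>
    intro j r free hj hjn hr hInv
    rw [PySem.List.pyRange_neg_one_eq_nil (by omega)]
    rfl
  | succ k ih =>
    intro j r free hj hjn hr hInv
    rw [PySem.List.pyRange_neg_one_cons (by omega), List.foldl_cons, List.foldl_cons]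
    obtain ⟨heq, hInv', hlen⟩ := stepBoth n j r free (by omega) hjn hr hInv
    rw [heq]
    have : bstep (r, free) j = ((bstep (r, free) j).1, (bstep (r, free) j).2) := rfl
    rw [this]
    exact ih (j - 1) (bstep (r, free) j).1 (bstep (r, free) j).2 (by omega) (by omega)
      (by omega) hInv'

theorem astep_top (n : Nat) (r : List String) : astepRow (n : Int) ((n : Int) - 1) r = r := by
  unfold astepRow tiltScan
  rw [PySem.List.pyRange_one_eq_nil (by omega), List.foldl_nil]
  simp

theorem row_eq (n : Nat) (r : List String) (hr : n ≤ r.length) :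
    (PySem.List.pyRange ((n : Int) - 2) (-1) (-1)).foldl (fun r col => astepRow (n : Int) col r) r
      = ((PySem.List.pyRange ((n : Int) - 1) (-1) (-1)).foldl bstep (r, none)).1 := by
  rcases Nat.eq_zero_or_pos n with hn | hn
  · subst hn
    rw [PySem.List.pyRange_neg_one_eq_nil (by omega), PySem.List.pyRange_neg_one_eq_nil (by omega)]
    rfl
  · rw [PySem.List.pyRange_neg_one_cons (a := (n : Int) - 1) (by omega), List.foldl_cons]
    have hInv0 : RowInv n ((n : Int) - 1) r none := by
      simp only [RowInv]; left; omega
    obtain ⟨heq, hInv', hlen⟩ := stepBoth n ((n : Int) - 1) r none (by omega) (by omega) hr hInv0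
    have hbr : (bstep (r, none) ((n : Int) - 1)).1 = r := by
      rw [← heq, astep_top]
    have : bstep (r, none) ((n : Int) - 1) = ((bstep (r, none) ((n : Int) - 1)).1,
        (bstep (r, none) ((n : Int) - 1)).2) := rfl
    rw [this, hbr]
    have e : (n : Int) - 1 - 1 = (n : Int) - 2 := by omega
    rw [e] at hInv'
    rw [hbr] at hInv'
    rw [show ((n : Int) - 1 - 1) = (n : Int) - 2 from e]
    exact rowLoop n (n - 1) ((n : Int) - 2) r (bstep (r, none) ((n : Int) - 1)).2
      (by omega) (by omega) hr hInv'

theorem inner_eq_map (f : List String → List String) :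
    ∀ (suf pre : List (List String)),
    (PySem.List.pyRange (pre.length : Int) ((pre.length : Int) + (suf.length : Int)) 1).foldl
      (fun g row => PySem.List.pySetD g row (f (PySem.List.pyGetD g row []))) (pre ++ suf)
      = pre ++ suf.map f := by
  intro suf
  induction suf with
  | nil =>
    intro pre
    rw [show ((pre.length : Int) + (([] : List (List String)).length : Int)) = (pre.length : Int)
      by simp]
    rw [PySem.List.pyRange_one_eq_nil le_rfl, List.foldl_nil]
    simp
  | cons x suf ih =>
    intro pre
    rw [PySem.List.pyRange_one_cons (by simp only [List.length_cons]; push_cast; omega),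
        List.foldl_cons]
    have hget : PySem.List.pyGetD (pre ++ x :: suf) (pre.length : Int) [] = x := by
      rw [PySem.List.pyGetD_natCast]
      simp [List.getD_eq_getElem?_getD]
    have hset : PySem.List.pySetD (pre ++ x :: suf) (pre.length : Int) (f x) = pre ++ f x :: suf := by
      rw [PySem.List.pySetD_natCast]
      rw [List.set_append_right _ _ (le_refl _)]
      simp
    rw [hget, hset]
    have e1 : pre ++ f x :: suf = (pre ++ [f x]) ++ suf := by simp
    have e2 : ((pre.length : Int) + 1) = (((pre ++ [f x]).length : Int)) := by simp
    have e3 : ((pre.length : Int) + ((x :: suf).length : Int))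
        = (((pre ++ [f x]).length : Int) + (suf.length : Int)) := by simp; omega
    rw [e1, e2, e3, ih (pre ++ [f x])]
    simp

theorem inner_eq (W col : Int) (g : List (List String)) :
    innerFold W (g.length : Int) col g = g.map (astepRow W col) := by
  have := inner_eq_map (astepRow W col) g []
  simpa [innerFold] using this

theorem outer_eq (W H : Int) (l : List Int) : ∀ (g : List (List String)), (g.length : Int) = H →
    l.foldl (fun g col => innerFold W H col g) g
      = g.map (fun r => l.foldl (fun r col => astepRow W col r) r) := by
  induction l with
  | nil => intro g hg; simp
  | cons c l ih =>
    intro g hg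
    rw [List.foldl_cons, show innerFold W H c g = g.map (astepRow W c) by rw [← hg, inner_eq]]
    rw [ih (g.map (astepRow W c)) (by simpa using hg)]
    rw [List.map_map]
    rfl

theorem tilt_east_eq_alt (grid : List (List String)) (hpre : Pre_tilt_east grid) :
    tilt_east grid = tilt_east_alt grid := by
  obtain ⟨hne, hlen⟩ := hpre
  unfold tilt_east tilt_east_alt
  have hW : PySem.List.pyGetD grid 0 [] = grid.getD 0 [] := PySem.List.pyGetD_zero grid []
  rw [outer_eq _ _ _ grid rfl]
  apply List.map_congr_left
  intro r hr
  have := row_eq ((grid.getD 0 []).length) r (hlen r hr)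
  rw [hW]
  exact this

-- ===== VERDICT (by name: the statement is the Claim_ definition above) =====
theorem tilt_east_spec : Claim_equal_tilt_east := by
  intro grid _ hpre
  unfold Spec_tilt_east
  exact tilt_east_eq_alt grid hpre
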